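-- pv_equiv track=rewrite | github.com/ejs/cyclingants | graphsearch.py | find_most_connected_node
-- ===== SOURCE A (Python) =====
-- def find_most_connected_node(graph):
--     most_connected, starting_points = 0, []
--     for node, edges in graph.items():
--         if len(edges) > most_connected:
--             most_connected = len(edges)
--             starting_points = [node]
--         elif len(edges) == most_connected:
--             starting_points.append(node)
--     return starting_points
-- ===== SOURCE B (Python) =====
-- def find_most_connected_node(graph):
--     most_connected = max((len(edges) for edges in graph.values()), default=0)
--     return [node for node, edges in graph.items() if len(edges) == most_connected]
-- ===== Notes on version B (the rewrite author's own statement) =====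
-- stated objective: simpler
-- what changed: Replaces A's single accumulator-threading loop (running max plus list reset/append) with a compute-max-then-filter decomposition: one pass computes the maximum degree, a comprehension collects the tied nodes.
import Mathlib
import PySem

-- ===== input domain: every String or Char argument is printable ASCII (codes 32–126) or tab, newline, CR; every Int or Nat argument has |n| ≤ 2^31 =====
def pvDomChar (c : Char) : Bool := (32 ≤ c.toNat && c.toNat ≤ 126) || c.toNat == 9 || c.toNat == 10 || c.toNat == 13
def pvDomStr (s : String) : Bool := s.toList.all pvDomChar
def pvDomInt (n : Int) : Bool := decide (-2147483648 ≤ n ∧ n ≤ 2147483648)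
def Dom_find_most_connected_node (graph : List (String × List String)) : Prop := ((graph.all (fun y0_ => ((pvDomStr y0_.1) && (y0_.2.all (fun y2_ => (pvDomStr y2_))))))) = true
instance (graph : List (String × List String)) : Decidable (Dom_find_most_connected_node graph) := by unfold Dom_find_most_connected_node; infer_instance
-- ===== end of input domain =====

-- B replaces A's single accumulator-threading max-with-ties loop by a compute-max-then-filter decomposition (simpler).


-- ===== PORT A =====
-- A's loop: state (most_connected, starting_points), one pass over graph.items()
def find_most_connected_node (graph : List (String × List String)) : List String :=
  (graph.foldl (fun (st : Nat × List String) p =>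
      if p.2.length > st.1 then (p.2.length, [p.1])
      else if p.2.length = st.1 then (st.1, st.2 ++ [p.1])
      else st) (0, [])).2

-- ===== PORT B =====
-- B: max degree (default 0) in one pass, then filter the tied nodes
def find_most_connected_node_alt (graph : List (String × List String)) : List String :=
  let most_connected := graph.foldl (fun acc p => max acc p.2.length) 0
  (graph.filter (fun p => p.2.length = most_connected)).map (fun p => p.1)

-- ===== PRECONDITION & SPEC =====
def Spec_find_most_connected_node (graph : List (String × List String)) (out : List String) : Prop := out = find_most_connected_node_alt graph
instance (graph : List (String × List String)) (out : List String) : Decidable (Spec_find_most_connected_node graph out) := by unfold Spec_find_most_connected_node; infer_instance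

-- ===== CLAIM (what is proved, stated in full; the proofs are below) =====
def Claim_equal_find_most_connected_node : Prop := ∀ (graph : List (String × List String)), Dom_find_most_connected_node graph → Spec_find_most_connected_node graph (find_most_connected_node graph)

-- ===== LEMMAS AND PROOFS =====

def pvMaxDeg (l : List (String × List String)) (m : Nat) : Nat :=
  l.foldl (fun acc p => max acc p.2.length) m

theorem pvMaxDeg_le (l : List (String × List String)) (m : Nat) : m ≤ pvMaxDeg l m := by
  induction l generalizing m with
  | nil => simp [pvMaxDeg]
  | cons p l ih =>
      have := ih (max m p.2.length)
      simp only [pvMaxDeg, List.foldl_cons] at *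
      exact le_trans (le_max_left _ _) this

theorem pvLoop_char (l : List (String × List String)) (m : Nat) (pts : List String) :
    l.foldl (fun (st : Nat × List String) p =>
      if p.2.length > st.1 then (p.2.length, [p.1])
      else if p.2.length = st.1 then (st.1, st.2 ++ [p.1])
      else st) (m, pts)
    = (pvMaxDeg l m,
       (if pvMaxDeg l m = m then pts else []) ++
         (l.filter (fun p => p.2.length = pvMaxDeg l m)).map (fun p => p.1)) := by
  induction l generalizing m pts with
  | nil => simp [pvMaxDeg]
  | cons p l ih =>
      have key : pvMaxDeg (p :: l) m = pvMaxDeg l (max m p.2.length) := by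
        simp [pvMaxDeg]
      rcases lt_trichotomy m p.2.length with h | h | h
      · -- d > m : reset
        have hmax : max m p.2.length = p.2.length := by omega
        have hd : p.2.length ≤ pvMaxDeg l p.2.length := pvMaxDeg_le l _
        have hne : pvMaxDeg (p :: l) m ≠ m := by rw [key, hmax]; omega
        simp only [List.foldl_cons, if_pos h, ih]
        rw [key, hmax]
        have hne' : pvMaxDeg l p.2.length ≠ m := by omega
        simp only [List.filter_cons]
        rw [if_neg hne']
        by_cases hc : p.2.length = pvMaxDeg l p.2.length
        · simp [hc.symm]
        · have h2 : ¬ (pvMaxDeg l p.2.length = p.2.length) := fun e => hc e.symm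
          simp [hc, h2]
      · -- d = m : append
        have hmax : max m p.2.length = m := by omega
        have hkey : pvMaxDeg (p :: l) m = pvMaxDeg l m := by rw [key, hmax]
        simp only [List.foldl_cons, if_neg (by omega : ¬ p.2.length > m), if_pos h.symm, ih]
        rw [hkey]
        simp only [List.filter_cons]
        by_cases hM : pvMaxDeg l m = m
        · have : p.2.length = pvMaxDeg l m := by omega
          simp [hM, this]
        · have : ¬ p.2.length = pvMaxDeg l m := by
            have := pvMaxDeg_le l m; omega
          simp [hM, this]
      · -- d < m : skip
        have hmax : max m p.2.length = m := by omega
        have hkey : pvMaxDeg (p :: l) m = pvMaxDeg l m := by rw [key, hmax]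
        simp only [List.foldl_cons, if_neg (by omega : ¬ p.2.length > m),
          if_neg (by omega : ¬ p.2.length = m), ih]
        rw [hkey]
        have : ¬ p.2.length = pvMaxDeg l m := by
          have := pvMaxDeg_le l m; omega
        simp [this]

-- ===== VERDICT (by name: the statement is the Claim_ definition above) =====
theorem find_most_connected_node_spec : Claim_equal_find_most_connected_node := by
  intro graph _
  unfold Spec_find_most_connected_node find_most_connected_node find_most_connected_node_alt
  rw [pvLoop_char]
  simp only [ite_self, List.nil_append]
  rfl
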